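-- pv_equiv track=rewrite | github.com/kuntito/LeetcodeGrind | grind__active/118 (minimum penalty for a shop)/118a.py | get_no_prefix
-- ===== SOURCE A (Python) =====
-- def get_no_prefix(customers):
--     res = [0 for _ in customers]
--
--     count = 0
--     for idx, c in enumerate(customers):
--         if c == 'N':
--             count += 1
--         res[idx] = count
--
--     return res
-- ===== SOURCE B (Python) =====
-- def get_no_prefix(customers):
--     return [customers[:i + 1].count('N') for i in range(len(customers))]
-- ===== Notes on version B (the rewrite author's own statement) =====
-- stated objective: alternative
-- what changed: Replaces the mutable zero-filled list and running accumulator with a comprehension that counts the target letter directly in each prefix slice customers[:i+1].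
import Mathlib
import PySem

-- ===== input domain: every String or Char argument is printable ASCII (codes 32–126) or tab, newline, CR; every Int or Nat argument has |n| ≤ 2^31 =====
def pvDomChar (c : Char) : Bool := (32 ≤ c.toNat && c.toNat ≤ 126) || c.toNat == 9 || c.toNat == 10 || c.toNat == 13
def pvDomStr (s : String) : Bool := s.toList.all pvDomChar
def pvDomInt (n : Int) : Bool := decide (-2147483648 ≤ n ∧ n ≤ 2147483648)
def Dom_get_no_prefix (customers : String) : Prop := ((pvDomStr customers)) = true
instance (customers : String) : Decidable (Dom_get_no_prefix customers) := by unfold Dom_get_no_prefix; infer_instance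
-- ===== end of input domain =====

-- B replaces A's zero-filled list + running accumulator with a comprehension that counts the
-- target letter directly in each prefix slice customers[:i+1] (alternative decomposition, not faster).

-- ===== PORT A =====
-- res = [0 for _ in customers]; count = 0; for idx, c in enumerate(customers): if c == 'N': count += 1; res[idx] = count
def get_no_prefix (customers : String) : List Int :=
  let res : List Int := customers.toList.map (fun _ => 0)
  ((PySem.List.enumerate customers.toList).foldl
    (fun (st : Int × List Int) ic =>
      let count := if ic.2 = 'N' then st.1 + 1 else st.1
      (count, PySem.List.pySetD st.2 ic.1 count))
    (0, res)).2

-- ===== PORT B =====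
-- return [customers[:i + 1].count('N') for i in range(len(customers))]
def get_no_prefix_alt (customers : String) : List Int :=
  (PySem.List.pyRange 0 (PySem.Str.len customers) 1).map
    (fun i => (PySem.Str.count (PySem.Str.slice customers none (some (i + 1))) "N" : Int))

-- ===== PRECONDITION & SPEC =====
def Spec_get_no_prefix (customers : String) (out : List Int) : Prop := out = get_no_prefix_alt customers
instance (customers : String) (out : List Int) : Decidable (Spec_get_no_prefix customers out) := by unfold Spec_get_no_prefix; infer_instance

-- ===== CLAIM (what is proved, stated in full; the proofs are below) =====
def Claim_equal_get_no_prefix : Prop := ∀ (customers : String), Dom_get_no_prefix customers → Spec_get_no_prefix customers (get_no_prefix customers)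

-- ===== LEMMAS AND PROOFS =====

-- prefix counts of 'N' starting from accumulator c (proof-only reference function)
def pvPC : List Char → Int → List Int
  | [], _ => []
  | x :: xs, c => (if x = 'N' then c + 1 else c) :: pvPC xs (if x = 'N' then c + 1 else c)

theorem pv_take_set (res : List Int) (k : Nat) (c : Int) (h : k < res.length) :
    (res.set k c).take (k + 1) = res.take k ++ [c] := by
  rw [List.take_add_one]
  congr 1
  · exact List.take_set_of_le le_rfl
  · simp [h]

theorem pv_foldlA (cs : List Char) : ∀ (k : Nat) (count : Int) (res : List Int),
    res.length = k + cs.length →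
    ((PySem.List.enumerate cs (k : Int)).foldl
      (fun (st : Int × List Int) ic =>
        let c' := if ic.2 = 'N' then st.1 + 1 else st.1
        (c', PySem.List.pySetD st.2 ic.1 c'))
      (count, res)).2 = res.take k ++ pvPC cs count := by
  induction cs with
  | nil =>
    intro k count res h
    simp only [List.length_nil] at h
    simp [PySem.List.enumerate_nil, pvPC, List.take_of_length_le (by omega : res.length ≤ k)]
  | cons x t ih =>
    intro k count res h
    rw [PySem.List.enumerate_cons]
    simp only [List.foldl_cons]
    have hk : (k : Int) + 1 = ((k + 1 : Nat) : Int) := by push_cast; ring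
    have hset : PySem.List.pySetD res (k : Int) (if x = 'N' then count + 1 else count)
        = res.set k (if x = 'N' then count + 1 else count) := by
      simp
    simp only [hk, hset]
    rw [ih (k + 1) (if x = 'N' then count + 1 else count) _ (by simp [h]; omega)]
    rw [pv_take_set res k _ (by simp at h ⊢; omega)]
    simp [pvPC]

theorem pv_A_eq_pc (customers : String) :
    get_no_prefix customers = pvPC customers.toList 0 := by
  unfold get_no_prefix
  have := pv_foldlA customers.toList 0 0 (customers.toList.map (fun _ => (0 : Int)))
    (by simp)
  simpa using this

theorem pv_chars_count_singleton (cs : List Char) (c : Char) : ∀ (fuel acc : ℕ),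
    cs.length ≤ fuel → PySem.Chars.count.go [c] fuel cs acc = acc + cs.count c := by
  induction cs with
  | nil => intro fuel acc h; cases fuel <;> simp [PySem.Chars.count.go]
  | cons x t ih =>
    intro fuel acc h
    cases fuel with
    | zero => simp at h
    | succ f =>
      simp only [PySem.Chars.count.go]
      by_cases hx : x = c
      · simp [hx, List.isPrefixOf, ih f (acc + 1) (by simpa using h)]
        omega
      · have hpre : ([c].isPrefixOf (x :: t)) = false := by
          simp [List.isPrefixOf]; exact fun hh => absurd hh.symm hx
        simp [hpre, ih f acc (by simpa using h), hx]

theorem pv_count_singleton (cs : List Char) (c : Char) :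
    PySem.Chars.count cs [c] = cs.count c := by
  simp [PySem.Chars.count, pv_chars_count_singleton cs c cs.length 0 le_rfl]

theorem pv_pc_eq_map (cs : List Char) : ∀ (c : Int),
    pvPC cs c = (List.range cs.length).map
      (fun i => c + ((cs.take (i + 1)).count 'N' : Int)) := by
  induction cs with
  | nil => intro c; simp [pvPC]
  | cons x t ih =>
    intro c
    rw [List.length_cons, List.range_succ_eq_map, List.map_cons, List.map_map]
    simp only [pvPC, ih]
    congr 1
    · by_cases hx : x = 'N' <;> simp [hx]
    · apply List.map_congr_left
      intro i _
      by_cases hx : x = 'N' <;> simp [Function.comp, hx, List.take_succ_cons]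
      ring

theorem pv_B_eq_pc (customers : String) :
    get_no_prefix_alt customers = pvPC customers.toList 0 := by
  unfold get_no_prefix_alt
  rw [pv_pc_eq_map]
  have hlen : PySem.Str.len customers = ((customers.toList.length : Nat) : Int) := by
    simp
  rw [hlen, PySem.List.pyRange_zero_nat, List.map_map]
  apply List.map_congr_left
  intro i _
  simp only [Function.comp]
  have hslice : (PySem.Str.slice customers none (some ((i : Int) + 1))).toList
      = customers.toList.take (i + 1) := by
    have h1 : ((i : Int) + 1) = ((i + 1 : Nat) : Int) := by push_cast; ring
    rw [PySem.Str.toList_slice, h1, PySem.Chars.slice_eq_listSlice, PySem.List.slice_to_natCast]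
  rw [PySem.Str.count_eq, hslice]
  have : ("N" : String).toList = ['N'] := rfl
  rw [this, pv_count_singleton]
  ring

-- ===== VERDICT (by name: the statement is the Claim_ definition above) =====
theorem get_no_prefix_spec : Claim_equal_get_no_prefix := by
  intro customers _
  unfold Spec_get_no_prefix
  rw [pv_A_eq_pc, pv_B_eq_pc]
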